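-- pv_equiv track=rewrite | github.com/matcianfa/playground-X1rXTswJ | python-project/Defis/Euler_122_Correction.py | longueur_mini
-- ===== SOURCE A (Python) =====
-- def longueur_mini(n):
--     liste_suites=[[1]] # Liste dans laquelle on met toutes les suites qu'on construit au fur et à mesure. On commence par les suites de longueur 1 puis il y aura celles de longueur 2 etc.
--     while True :
--         nv_liste_suites=[]
--         for liste_prec in reversed(liste_suites): # On inverse pour gagner un peu en vitesse car a priori, plus le dernier terme est grand plus on arrivera vite à n...
--             dernier=liste_prec[-1]
--             for el in liste_prec:
--                 nouveau = el + dernier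
--                 if nouveau<n : # Si on a trouvé la suite qui termine en n, on la renvoie. Ca sera forcément la plus courte
--                     nv_liste_suites.append(liste_prec+[nouveau])
--                 elif nouveau ==n :
--                     return len(liste_prec)+1
--                 else :
--                     break # Si nouveau > n, tous ses suivants le seront aussi donc inutile de continuer à chercher
--         liste_suites=nv_liste_suites.copy()
-- ===== SOURCE B (Python) =====
-- # Iterative-deepening DFS over star addition chains (reversed-chain, branch-and-bound
-- # doubling prune) instead of A's breadth-first materialization of all chains.
-- def _rec(n, r, rc):
--     # rc: chain in reverse (rc[0] is the current largest/last element)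
--     if r == 0:
--         return False
--     v = rc[0]
--     if v * (2 ** r) < n:  # even doubling every step cannot reach n
--         return False
--     for el in rc:
--         w = el + v
--         if w == n:
--             return True
--         if w < n and _rec(n, r - 1, [w] + rc):
--             return True
--     return False
--
-- def longueur_mini(n):
--     k = 1
--     while not _rec(n, k, [1]):
--         k += 1
--     return k + 1
-- ===== Notes on version B (the rewrite author's own statement) =====
-- stated objective: faster
-- what changed: A materializes every star addition chain level by level (breadth-first, exponential memory); B runs iterative-deepening depth-first search over reversed chains with a branch-and-bound doubling prune (v*2^r < n cuts the branch), keeping only the current chain in memory.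
import Mathlib
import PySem

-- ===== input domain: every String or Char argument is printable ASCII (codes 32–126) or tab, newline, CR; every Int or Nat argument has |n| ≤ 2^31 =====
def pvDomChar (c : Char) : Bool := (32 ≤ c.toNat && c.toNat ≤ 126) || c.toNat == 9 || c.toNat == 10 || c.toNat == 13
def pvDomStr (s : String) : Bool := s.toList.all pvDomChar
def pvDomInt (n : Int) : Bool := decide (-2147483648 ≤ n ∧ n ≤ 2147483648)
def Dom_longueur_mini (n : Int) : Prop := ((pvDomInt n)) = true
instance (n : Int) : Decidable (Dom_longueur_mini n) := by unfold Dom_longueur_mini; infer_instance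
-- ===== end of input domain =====

-- B replaces A's breadth-first materialization of all star addition chains by an
-- iterative-deepening depth-first search with a doubling branch-and-bound prune (faster).

-- ===== PORT A =====
-- inner 'for el in liste_prec' loop: append, return, or break.
-- nv_liste_suites.append (amortized O(1) in Python) is rendered as cons onto the accumulator
-- plus one List.reverse when the level ends (in aLoop below), so the accumulated list is
-- exactly Python's nv_liste_suites.
def aInner (n dernier : Int) (prec : List Int) : List Int → List (List Int) → Sum Int (List (List Int))
  | [], acc => .inr acc
  | el :: rest, acc =>
      let nouveau := el + dernier
      if nouveau < n then aInner n dernier prec rest ((prec ++ [nouveau]) :: acc)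
      else if nouveau = n then .inl ((prec.length : Int) + 1)
      else .inr acc

-- outer 'for liste_prec in reversed(liste_suites)' loop accumulating nv_liste_suites
def aOuter (n : Int) : List (List Int) → List (List Int) → Sum Int (List (List Int))
  | [], acc => .inr acc
  | prec :: rest, acc =>
      match aInner n ((PySem.List.pyGet? prec (-1)).getD 0) prec prec acc with
      | .inl a => .inl a
      | .inr acc' => aOuter n rest acc'

-- 'while True' loop over levels; fuel n.toNat + 1 (the search provably returns by level n - 2
-- for n ≥ 2, see aLoop_eq below; for n < 2 Python A loops forever and Pre_ excludes those n)
def aLoop (n : Int) : Nat → List (List Int) → Int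
  | 0, _ => 0
  | f + 1, fr =>
      match aOuter n fr.reverse [] with
      | .inl a => a
      | .inr nv => aLoop n f nv.reverse

def longueur_mini (n : Int) : Int := aLoop n (n.toNat + 1) [[1]]

-- ===== PORT B =====
-- _rec(n, r, rc): can the reversed chain rc (rc.head = last element) reach n within r steps?
def bRec (n : Int) : Nat → List Int → Bool
  | 0, _ => false
  | r + 1, rc =>
      let v := rc.headI
      if v * 2 ^ (r + 1) < n then false
      else rc.any fun el =>
        let w := el + v
        w == n || (decide (w < n) && bRec n r (w :: rc))

-- 'k = 1; while not _rec(n, k, [1]): k += 1; return k + 1' with fuel n.toNat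
def bLoop (n : Int) : Nat → Nat → Int
  | 0, _ => 0
  | f + 1, k => if bRec n k [1] then (k : Int) + 1 else bLoop n f (k + 1)

def longueur_mini_alt (n : Int) : Int := bLoop n n.toNat 1

-- ===== PRECONDITION & SPEC =====
-- Python A returns only for n ≥ 2; for n ≤ 1 it loops forever (so does B), hence excluded.
def Pre_longueur_mini (n : Int) : Prop := 2 ≤ n
instance (n : Int) : Decidable (Pre_longueur_mini n) := by unfold Pre_longueur_mini; infer_instance
def pvWitness_longueur_mini : Int := 7
def Spec_longueur_mini (n : Int) (out : Int) : Prop := out = longueur_mini_alt n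
instance (n : Int) (out : Int) : Decidable (Spec_longueur_mini n out) := by unfold Spec_longueur_mini; infer_instance

-- ===== CLAIM (what is proved, stated in full; the proofs are below) =====
def Claim_equal_longueur_mini : Prop := ∀ (n : Int), Dom_longueur_mini n → Pre_longueur_mini n → Spec_longueur_mini n (longueur_mini n)

-- ===== LEMMAS AND PROOFS =====

-- 'can reach n within r more star steps': v = current last element, elems = chain elements
def Reach (n : Int) : Int → List Int → Nat → Prop
  | _, _, 0 => False
  | v, elems, r + 1 => ∃ el ∈ elems, el + v = n ∨ (el + v < n ∧ Reach n (el + v) ((el + v) :: elems) r)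

-- Reach only looks at membership of elems
theorem reach_congr (n : Int) : ∀ (r : Nat) (v : Int) (e₁ e₂ : List Int),
    (∀ x, x ∈ e₁ ↔ x ∈ e₂) → (Reach n v e₁ r ↔ Reach n v e₂ r) := by
  intro r
  induction r with
  | zero => intro v e₁ e₂ _; simp [Reach]
  | succ r ih =>
    intro v e₁ e₂ h
    constructor
    · rintro ⟨el, hel, hc⟩
      refine ⟨el, (h el).1 hel, ?_⟩
      rcases hc with h1 | ⟨h1, h2⟩
      · exact Or.inl h1
      · exact Or.inr ⟨h1, (ih _ _ _ (by intro x; simp [h x])).1 h2⟩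
    · rintro ⟨el, hel, hc⟩
      refine ⟨el, (h el).2 hel, ?_⟩
      rcases hc with h1 | ⟨h1, h2⟩
      · exact Or.inl h1
      · exact Or.inr ⟨h1, (ih _ _ _ (by intro x; simp [h x])).2 h2⟩

-- existence: adding 1 each step reaches n
theorem reach_exists (n : Int) : ∀ (d : Nat) (v : Int) (elems : List Int),
    1 ∈ elems → v < n → n - v ≤ (d : Int) → Reach n v elems d := by
  intro d
  induction d with
  | zero => intro v elems _ hv hd; omega
  | succ d ih =>
    intro v elems h1 hv hd
    by_cases he : 1 + v = n
    · exact ⟨1, h1, Or.inl he⟩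
    · refine ⟨1, h1, Or.inr ⟨by omega, ih (1 + v) _ (List.mem_cons_of_mem _ h1) (by omega) (by push_cast at hd; omega)⟩⟩

-- the chains A's frontier holds at level i (exactly i extension steps, all elements < n)
inductive AChain (n : Int) : Nat → List Int → Prop
  | base : AChain n 0 [1]
  | step {i : Nat} {c : List Int} {el : Int} : AChain n i c → el ∈ c →
      el + c.getLastD 0 < n → AChain n (i + 1) (c ++ [el + c.getLastD 0])

theorem achain_props {n : Int} (hn : 2 ≤ n) : ∀ {i : Nat} {c : List Int}, AChain n i c →
    c ≠ [] ∧ c.length = i + 1 ∧ List.Pairwise (· < ·) c ∧ 1 ∈ c ∧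
      (∀ x ∈ c, 1 ≤ x ∧ x < n) ∧ (∀ x ∈ c, x ≤ c.getLastD 0) := by
  intro i c h
  induction h with
  | base => simp; omega
  | @step i c el hc hel hlt ih =>
    obtain ⟨hne, hlen, hpw, h1, hbd, hle⟩ := ih
    have hel1 : 1 ≤ el := (hbd el hel).1
    have hlast : 1 ≤ c.getLastD 0 := by
      have := hle el hel; omega
    have hgt : ∀ x ∈ c, x < el + c.getLastD 0 := by
      intro x hx
      have := hle x hx; omega
    refine ⟨by simp, by simp [hlen], ?_, by simp [h1], ?_, ?_⟩
    · rw [List.pairwise_append]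
      exact ⟨hpw, by simp, by simpa using hgt⟩
    · intro x hx
      rcases List.mem_append.1 hx with hx | hx
      · exact hbd x hx
      · simp only [List.mem_singleton] at hx; subst hx; omega
    · intro x hx
      rw [List.getLastD_concat]
      rcases List.mem_append.1 hx with hx | hx
      · exact le_of_lt (hgt x hx)
      · simp only [List.mem_singleton] at hx; omega

-- glue an AChain prefix onto a Reach suffix
theorem achain_reach {n : Int} : ∀ {i : Nat} {c : List Int}, AChain n i c →
    ∀ r, Reach n (c.getLastD 0) c r → Reach n 1 [1] (i + r) := by
  intro i c h
  induction h with
  | base => intro r hr; simpa using hr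
  | @step i c el hc hel hlt ih =>
    intro r hr
    have heq : (c ++ [el + c.getLastD 0]).getLastD 0 = el + c.getLastD 0 := List.getLastD_concat ..
    rw [heq] at hr
    have hr' : Reach n (el + c.getLastD 0) ((el + c.getLastD 0) :: c) r :=
      (reach_congr n r _ _ _ (by intro x; simp; tauto)).1 hr
    have : Reach n (c.getLastD 0) c (r + 1) := ⟨el, hel, Or.inr ⟨hlt, hr'⟩⟩
    have := ih (r + 1) this
    rwa [show i + 1 + r = i + (r + 1) by omega]

-- a Reach path from a frontier chain yields a chain with a one-step hit at some later level
theorem reach_achain {n : Int} : ∀ (r : Nat) {i : Nat} {c : List Int}, AChain n i c →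
    Reach n (c.getLastD 0) c r →
    ∃ m, m < r ∧ ∃ c', AChain n (i + m) c' ∧ ∃ el ∈ c', el + c'.getLastD 0 = n := by
  intro r
  induction r with
  | zero => intro i c _ hr; exact absurd hr (by simp [Reach])
  | succ r ih =>
    rintro i c hc ⟨el, hel, hcase⟩
    rcases hcase with heq | ⟨hlt, hr⟩
    · exact ⟨0, by omega, c, by simpa using hc, el, hel, heq⟩
    · have hc' : AChain n (i + 1) (c ++ [el + c.getLastD 0]) := AChain.step hc hel hlt
      have hr' : Reach n ((c ++ [el + c.getLastD 0]).getLastD 0) (c ++ [el + c.getLastD 0]) r := by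
        rw [List.getLastD_concat]
        exact (reach_congr n r _ _ _ (by intro x; simp; tauto)).1 hr
      obtain ⟨m, hm, c', hc'', hhit⟩ := ih hc' hr'
      exact ⟨m + 1, by omega, c', by rwa [show i + (m + 1) = i + 1 + m by omega], hhit⟩

-- inner loop, hit case: returns len(prec) + 1
theorem inner_hit {n : Int} : ∀ (s : List Int) (v : Int) (prec : List Int) (acc : List (List Int)),
    List.Pairwise (· < ·) s → (∃ el ∈ s, el + v = n) →
    aInner n v prec s acc = .inl ((prec.length : Int) + 1) := by
  intro s
  induction s with
  | nil => rintro v prec acc _ ⟨el, hel, _⟩; simp at hel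
  | cons el rest ih =>
    rintro v prec acc hpw ⟨el₀, hel₀, hhit⟩
    rw [List.pairwise_cons] at hpw
    simp only [aInner]
    by_cases h1 : el + v < n
    · rw [if_pos h1]
      apply ih _ _ _ hpw.2
      rcases List.mem_cons.1 hel₀ with rfl | h
      · omega
      · exact ⟨el₀, h, hhit⟩
    · rcases List.mem_cons.1 hel₀ with rfl | h
      · rw [if_neg h1, if_pos hhit]
      · have := hpw.1 el₀ h; omega

-- inner loop, no-hit case: conses exactly the extensions staying below n onto acc
theorem inner_nohit {n : Int} : ∀ (s : List Int) (v : Int) (prec : List Int) (acc : List (List Int)),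
    List.Pairwise (· < ·) s → (∀ el ∈ s, el + v ≠ n) →
    ∃ new, aInner n v prec s acc = .inr new ∧
      ∀ c', c' ∈ new ↔ (c' ∈ acc ∨ ∃ el ∈ s, el + v < n ∧ c' = prec ++ [el + v]) := by
  intro s
  induction s with
  | nil => intro v prec acc _ _; exact ⟨acc, by simp [aInner], by simp⟩
  | cons el rest ih =>
    intro v prec acc hpw hno
    rw [List.pairwise_cons] at hpw
    simp only [aInner]
    by_cases h1 : el + v < n
    · rw [if_pos h1]
      obtain ⟨new, heq, hmem⟩ := ih v prec ((prec ++ [el + v]) :: acc) hpw.2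
        (fun e he => hno e (List.mem_cons_of_mem _ he))
      refine ⟨new, heq, ?_⟩
      intro c'
      rw [hmem c']
      constructor
      · rintro (hc | ⟨e, he, hlt, rfl⟩)
        · rcases List.mem_cons.1 hc with rfl | hc
          · exact Or.inr ⟨el, by simp, h1, rfl⟩
          · exact Or.inl hc
        · exact Or.inr ⟨e, List.mem_cons_of_mem _ he, hlt, rfl⟩
      · rintro (hc | ⟨e, he, hlt, rfl⟩)
        · exact Or.inl (List.mem_cons_of_mem _ hc)
        · rcases List.mem_cons.1 he with rfl | he
          · exact Or.inl (by simp)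
          · exact Or.inr ⟨e, he, hlt, rfl⟩
    · rw [if_neg h1, if_neg (hno el (by simp))]
      refine ⟨acc, rfl, ?_⟩
      intro c'
      constructor
      · exact fun h => Or.inl h
      · rintro (hc | ⟨e, he, hlt, rfl⟩)
        · exact hc
        · exfalso
          have hne := hno el (by simp)
          rcases List.mem_cons.1 he with rfl | he
          · omega
          · have := hpw.1 e he; omega

-- dernier = liste_prec[-1]
theorem dernier_eq {c : List Int} : (PySem.List.pyGet? c (-1)).getD 0 = c.getLastD 0 := by
  simp [pysem, List.getLastD_eq_getLast?]

-- outer loop, hit case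
theorem outer_hit {n : Int} (hn : 2 ≤ n) {i : Nat} : ∀ (P : List (List Int)) (acc : List (List Int)),
    (∀ c ∈ P, AChain n i c) → (∃ c ∈ P, ∃ el ∈ c, el + c.getLastD 0 = n) →
    aOuter n P acc = .inl ((i : Int) + 2) := by
  intro P
  induction P with
  | nil => rintro acc _ ⟨c, hc, _⟩; simp at hc
  | cons prec rest ih =>
    rintro acc hP ⟨c, hc, hhit⟩
    obtain ⟨hne, hlen, hpw, -, -, -⟩ := achain_props hn (hP prec (by simp))
    simp only [aOuter, dernier_eq]
    by_cases hh : ∃ el ∈ prec, el + prec.getLastD 0 = n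
    · rw [inner_hit prec _ prec acc hpw hh]
      have : ((prec.length : Int) + 1) = (i : Int) + 2 := by
        rw [hlen]; push_cast; ring
      rw [this]
    · obtain ⟨new, heq, -⟩ := inner_nohit prec _ prec acc hpw
        (by intro e he hcon; exact hh ⟨e, he, hcon⟩)
      rw [heq]
      rcases List.mem_cons.1 hc with rfl | hc'
      · exact absurd hhit hh
      · exact ih _ (fun c hc => hP c (List.mem_cons_of_mem _ hc)) ⟨c, hc', hhit⟩

-- outer loop, no-hit case
theorem outer_nohit {n : Int} (hn : 2 ≤ n) {i : Nat} : ∀ (P : List (List Int)) (acc : List (List Int)),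
    (∀ c ∈ P, AChain n i c) → (∀ c ∈ P, ¬ ∃ el ∈ c, el + c.getLastD 0 = n) →
    ∃ new, aOuter n P acc = .inr new ∧
      ∀ c', c' ∈ new ↔ (c' ∈ acc ∨
        ∃ prec ∈ P, ∃ el ∈ prec, el + prec.getLastD 0 < n ∧ c' = prec ++ [el + prec.getLastD 0]) := by
  intro P
  induction P with
  | nil => intro acc _ _; exact ⟨acc, by simp [aOuter], by simp⟩
  | cons prec rest ih =>
    intro acc hP hno
    obtain ⟨hne, hlen, hpw, -, -, -⟩ := achain_props hn (hP prec (by simp))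
    simp only [aOuter, dernier_eq]
    obtain ⟨new₁, heq₁, hmem₁⟩ := inner_nohit prec _ prec acc hpw
      (by intro e he hcon; exact hno prec (by simp) ⟨e, he, hcon⟩)
    rw [heq₁]
    obtain ⟨new₂, heq₂, hmem₂⟩ := ih new₁
      (fun c hc => hP c (List.mem_cons_of_mem _ hc))
      (fun c hc => hno c (List.mem_cons_of_mem _ hc))
    refine ⟨new₂, heq₂, ?_⟩
    intro c'
    rw [hmem₂ c']
    constructor
    · rintro (h1 | ⟨p, hp, e, he, hlt, rfl⟩)
      · rcases (hmem₁ c').1 h1 with hc | ⟨e, he, hlt, rfl⟩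
        · exact Or.inl hc
        · exact Or.inr ⟨prec, by simp, e, he, hlt, rfl⟩
      · exact Or.inr ⟨p, List.mem_cons_of_mem _ hp, e, he, hlt, rfl⟩
    · rintro (hc | ⟨p, hp, e, he, hlt, hceq⟩)
      · exact Or.inl ((hmem₁ c').2 (Or.inl hc))
      · rcases List.mem_cons.1 hp with rfl | hp
        · exact Or.inl ((hmem₁ c').2 (Or.inr ⟨e, he, hlt, hceq⟩))
        · exact Or.inr ⟨p, hp, e, he, hlt, hceq⟩

-- the main A-side loop lemma: with a complete level-i frontier, aLoop returns K + 2
theorem aLoop_eq {n : Int} (hn : 2 ≤ n) {K : Nat}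
    (hK : Reach n 1 [1] (K + 1)) (hmin : ∀ j, j ≤ K → ¬ Reach n 1 [1] j) :
    ∀ (f i : Nat) (F : List (List Int)), (∀ c, c ∈ F ↔ AChain n i c) →
    i ≤ K → K - i < f → aLoop n f F = (K : Int) + 2 := by
  intro f
  induction f with
  | zero => intro i F _ _ h; omega
  | succ f ih =>
    intro i F hF hiK hfuel
    simp only [aLoop]
    by_cases hhit : ∃ c ∈ F.reverse, ∃ el ∈ c, el + c.getLastD 0 = n
    · obtain ⟨c, hc, hel⟩ := hhit
      rw [List.mem_reverse] at hc
      -- a hit at level i gives Reach (i+1); minimality forces i = K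
      have hri : Reach n 1 [1] (i + 1) := by
        have : Reach n (c.getLastD 0) c 1 := ⟨_, hel.choose_spec.1, Or.inl hel.choose_spec.2⟩
        · exact achain_reach ((hF c).1 hc) 1 this
      have hiK' : i = K := by
        by_contra hne
        exact hmin (i + 1) (by omega) hri
      rw [outer_hit hn F.reverse [] (fun c hc => (hF c).1 (List.mem_reverse.1 hc))
        ⟨c, List.mem_reverse.2 hc, hel⟩, hiK']
    · -- no hit at this level: i < K, recurse with the next frontier
      have hilt : i < K := by
        rcases Nat.lt_or_ge i K with h | h
        · exact h
        · exfalso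
          have hiK' : i = K := by omega
          subst hiK'
          obtain ⟨m, hm, c', hc', hhit'⟩ := reach_achain (i + 1) AChain.base (by simpa using hK)
          have hm' : m = i := by
            by_contra hne
            have hrm := achain_reach hc' 1 ⟨_, hhit'.choose_spec.1, Or.inl hhit'.choose_spec.2⟩
            simp only [Nat.zero_add] at hrm
            exact hmin (m + 1) (by omega) hrm
          subst hm'
          exact hhit ⟨c', List.mem_reverse.2 ((hF c').2 (by simpa using hc')), hhit'⟩
      obtain ⟨new, heq, hmem⟩ := outer_nohit hn F.reverse []
        (fun c hc => (hF c).1 (List.mem_reverse.1 hc))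
        (fun c hc hcon => hhit ⟨c, hc, hcon⟩)
      rw [heq]
      apply ih (i + 1) new.reverse _ (by omega) (by omega)
      intro c'
      rw [List.mem_reverse, hmem c']
      simp only [List.not_mem_nil, false_or]
      constructor
      · rintro ⟨p, hp, e, he, hlt, rfl⟩
        exact AChain.step ((hF p).1 (List.mem_reverse.1 hp)) he hlt
      · intro hc'
        cases hc' with
        | step hp he hlt =>
          exact ⟨_, List.mem_reverse.2 ((hF _).2 hp), _, he, hlt, rfl⟩

-- B side: no Reach path can beat doubling
theorem reach_le {n : Int} : ∀ (r : Nat) (v : Int) (elems : List Int),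
    (∀ el ∈ elems, 1 ≤ el ∧ el ≤ v) → Reach n v elems r → n ≤ v * 2 ^ r := by
  intro r
  induction r with
  | zero => intro v elems _ hr; exact absurd hr (by simp [Reach])
  | succ r ih =>
    rintro v elems hbd ⟨el, hel, hcase⟩
    obtain ⟨h1, h2⟩ := hbd el hel
    have hv : 1 ≤ v := le_trans h1 h2
    rcases hcase with heq | ⟨hlt, hr⟩
    · have h2r : (2 : Int) ≤ 2 ^ (r + 1) := by
        calc (2 : Int) = 2 ^ 1 := by ring
        _ ≤ 2 ^ (r + 1) := by
          apply pow_le_pow_right₀ <;> omega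
      nlinarith
    · have := ih (el + v) ((el + v) :: elems) ?_ hr
      · have h2r : v * 2 ^ (r + 1) = (2 * v) * 2 ^ r := by ring
        have hp : (0 : Int) < 2 ^ r := by positivity
        nlinarith
      · intro e he
        rcases List.mem_cons.1 he with rfl | he
        · constructor <;> omega
        · have := hbd e he; constructor <;> omega

-- _rec computes Reach (pruning is sound by reach_le)
theorem brec_iff {n : Int} : ∀ (r : Nat) (v : Int) (rest : List Int),
    (∀ el ∈ v :: rest, 1 ≤ el ∧ el ≤ v) →
    (bRec n r (v :: rest) = true ↔ Reach n v (v :: rest) r) := by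
  intro r
  induction r with
  | zero => intro v rest _; simp [bRec, Reach]
  | succ r ih =>
    intro v rest hbd
    simp only [bRec, List.headI]
    by_cases hpr : v * 2 ^ (r + 1) < n
    · rw [if_pos hpr]
      simp only [Bool.false_eq_true, false_iff]
      intro hr
      have := reach_le (r + 1) v (v :: rest) hbd hr
      omega
    · rw [if_neg hpr, List.any_eq_true]
      constructor
      · rintro ⟨el, hel, hb⟩
        simp only [Bool.or_eq_true, beq_iff_eq, Bool.and_eq_true, decide_eq_true_eq] at hb
        rcases hb with hb | ⟨hlt, hb⟩
        · exact ⟨el, hel, Or.inl hb⟩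
        · have hbd' : ∀ e ∈ (el + v) :: v :: rest, 1 ≤ e ∧ e ≤ el + v := by
            intro e he
            have h1 := (hbd el hel).1
            have h2 := (hbd el hel).2
            rcases List.mem_cons.1 he with rfl | he
            · constructor <;> omega
            · have := hbd e he; constructor <;> omega
          exact ⟨el, hel, Or.inr ⟨hlt, (ih (el + v) (v :: rest) hbd').1 hb⟩⟩
      · rintro ⟨el, hel, hcase⟩
        refine ⟨el, hel, ?_⟩
        simp only [Bool.or_eq_true, beq_iff_eq, Bool.and_eq_true, decide_eq_true_eq]
        rcases hcase with heq | ⟨hlt, hr⟩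
        · exact Or.inl heq
        · have hbd' : ∀ e ∈ (el + v) :: v :: rest, 1 ≤ e ∧ e ≤ el + v := by
            intro e he
            have h1 := (hbd el hel).1
            have h2 := (hbd el hel).2
            rcases List.mem_cons.1 he with rfl | he
            · constructor <;> omega
            · have := hbd e he; constructor <;> omega
          exact Or.inr ⟨hlt, (ih (el + v) (v :: rest) hbd').2 hr⟩

-- the main B-side loop lemma
theorem bLoop_eq {n : Int} {K : Nat}
    (hK : Reach n 1 [1] (K + 1)) (hmin : ∀ j, j ≤ K → ¬ Reach n 1 [1] j) :
    ∀ (f k : Nat), 1 ≤ k → k ≤ K + 1 → K + 1 - k < f → bLoop n f k = (K : Int) + 2 := by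
  intro f
  induction f with
  | zero => intro k _ _ h; omega
  | succ f ih =>
    intro k hk1 hkK hfuel
    simp only [bLoop]
    have hiff := brec_iff (n := n) k 1 [] (by simp)
    rcases Nat.lt_or_ge k (K + 1) with hlt | hge
    · have : bRec n k [1] = false := by
        rw [Bool.eq_false_iff]
        intro hb
        exact hmin k (by omega) (hiff.1 hb)
      rw [this]
      simp only [Bool.false_eq_true, if_false]
      exact ih (k + 1) (by omega) (by omega) (by omega)
    · have hkeq : k = K + 1 := by omega
      subst hkeq
      rw [hiff.2 hK]
      simp only [if_true]
      push_cast; ring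

-- ===== VERDICT (by name: the statement is the Claim_ definition above) =====
theorem longueur_mini_spec : Claim_equal_longueur_mini := by
  intro n _ hpre
  have hn : 2 ≤ n := hpre
  unfold Spec_longueur_mini
  have hP0 : Reach n 1 [1] ((n - 1).toNat - 1 + 1) := by
    rw [show (n - 1).toNat - 1 + 1 = (n - 1).toNat by omega]
    exact reach_exists n (n - 1).toNat 1 [1] (by simp) (by omega) (by omega)
  have hex : ∃ k, Reach n 1 [1] (k + 1) := ⟨_, hP0⟩
  letI : DecidablePred fun k => Reach n 1 [1] (k + 1) := fun _ => Classical.dec _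
  have hK : Reach n 1 [1] (Nat.find hex + 1) := Nat.find_spec hex
  have hmin : ∀ j, j ≤ Nat.find hex → ¬ Reach n 1 [1] j := by
    intro j hj hr
    match j, hr with
    | 0, hr => exact absurd hr (by simp [Reach])
    | j + 1, hr => exact Nat.find_min hex (by omega) hr
  have hKbd : Nat.find hex ≤ (n - 1).toNat - 1 := Nat.find_min' hex hP0
  have hinv : ∀ c, c ∈ [[1]] ↔ AChain n 0 c := by
    intro c
    constructor
    · intro hc; simp only [List.mem_singleton] at hc; subst hc; exact AChain.base
    · intro hc; cases hc; simp
  show longueur_mini n = longueur_mini_alt n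
  unfold longueur_mini longueur_mini_alt
  rw [aLoop_eq hn hK hmin (n.toNat + 1) 0 [[1]] hinv (by omega) (by omega),
      bLoop_eq hK hmin n.toNat 1 le_rfl (by omega) (by omega)]
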